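-- pv_equiv track=rewrite | github.com/douymLab/PhyloSOLID | src/scaffold_builder.py | map_group_to_backbone_mutations
-- ===== SOURCE A (Python) =====
-- def map_group_to_backbone_mutations(mutation_group, group_to_muts, backbone_mutations):
--     """
--     根据 mutation_group 中的组号，将 group_to_muts 中的组号替换为对应的 backbone_mutations 中的突变值。
--
--     参数:
--     mutation_group (dict): 每个突变到其对应组号的映射，格式为 {mutation: group}
--     group_to_muts (dict): 每个组号到突变列表的映射，格式为 {group: [mutations]}
--     backbone_mutations (list): backbone_mutations 列表，包含突变标识符
--
--     返回:
--     dict: 以 backbone_mutations 中的突变为键，每个组对应的突变列表为值，格式为 {backbone_mutation: [mutations]}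
--     """
--     # Step 1: 创建一个映射，从 mutation 到其对应的组号
--     mutation_to_group = {mutation: group for mutation, group in mutation_group.items()}
--
--     # Step 2: 使用这个映射，将 group_to_muts 中的 keys 替换为对应的 backbone_mutations
--     group_to_muts_with_backbone = {}
--
--     # 遍历每个组号，重新命名为 backbone_mutations 中的突变值
--     for group, mutations in group_to_muts.items():
--         # 找到与组号对应的 backbone mutation
--         new_key = [mutation for mutation in backbone_mutations if mutation_to_group.get(mutation) == group]
--         if new_key:  # 确保找到了对应的 backbone mutation
--             group_to_muts_with_backbone[new_key[0]] = mutations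
--
--     return group_to_muts_with_backbone
-- ===== SOURCE B (Python) =====
-- def map_group_to_backbone_mutations(mutation_group, group_to_muts, backbone_mutations):
--     # Reverse pass with unconditional overwrite: the earliest backbone mutation of each
--     # group is written last, so `first[g]` ends up as the first match in backbone order.
--     first = {}
--     for m in reversed(backbone_mutations):
--         g = mutation_group.get(m)
--         if g is not None:
--             first[g] = m
--     # Single comprehension over group_to_muts, in its order.
--     return {first[g]: muts for g, muts in group_to_muts.items() if g in first}
-- ===== Notes on version B (the rewrite author's own statement) =====
-- stated objective: faster
-- what changed: Replaces A's per-group inner scan of backbone_mutations by a single reverse pass over backbone_mutations that overwrites first[g]=m (so the first match in backbone order wins), followed by one dict comprehension over group_to_muts looking that map up.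
import Mathlib
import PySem

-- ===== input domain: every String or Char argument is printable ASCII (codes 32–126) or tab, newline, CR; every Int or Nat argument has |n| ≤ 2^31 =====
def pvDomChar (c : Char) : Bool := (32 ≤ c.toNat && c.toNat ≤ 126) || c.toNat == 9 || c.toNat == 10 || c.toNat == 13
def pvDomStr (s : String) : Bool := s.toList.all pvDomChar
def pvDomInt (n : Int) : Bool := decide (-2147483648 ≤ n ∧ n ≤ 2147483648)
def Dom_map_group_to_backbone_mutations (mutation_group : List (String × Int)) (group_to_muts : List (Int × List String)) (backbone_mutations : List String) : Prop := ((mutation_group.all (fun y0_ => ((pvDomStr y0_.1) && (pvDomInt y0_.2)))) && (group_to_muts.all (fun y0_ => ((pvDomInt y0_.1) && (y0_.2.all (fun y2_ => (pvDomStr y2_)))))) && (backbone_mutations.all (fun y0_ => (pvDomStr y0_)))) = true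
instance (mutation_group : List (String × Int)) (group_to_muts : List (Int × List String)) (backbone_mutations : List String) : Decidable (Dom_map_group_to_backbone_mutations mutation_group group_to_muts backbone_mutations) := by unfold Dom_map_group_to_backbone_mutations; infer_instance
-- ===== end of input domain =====

-- B replaces A's per-group inner scan of backbone_mutations by one reverse pass over
-- backbone_mutations with overwrite (first match wins) plus one lookup pass over group_to_muts.


-- ===== PORT A =====
-- Literal port of A: rebuild mutation->group dict, then loop over group_to_muts scanning
-- backbone_mutations (list comprehension = filter) for mutations whose group matches.
def map_group_to_backbone_mutations (mutation_group : List (String × Int)) (group_to_muts : List (Int × List String)) (backbone_mutations : List String) : List (String × List String) :=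
  let mgd : PySem.Dict String Int := PySem.Dict.ofList mutation_group
  let mutation_to_group : PySem.Dict String Int :=
    mgd.items.foldl (fun d p => d.insert p.1 p.2) PySem.Dict.empty
  let res : PySem.Dict String (List String) :=
    (PySem.Dict.ofList group_to_muts).items.foldl (fun acc p =>
      let newKey := backbone_mutations.filter (fun m => mutation_to_group.get? m == some p.1)
      match newKey with
      | [] => acc
      | k :: _ => acc.insert k p.2) PySem.Dict.empty
  res.items

-- ===== PORT B =====
-- Port of B: reversed pass over backbone_mutations with unconditional overwrite, then a
-- dict comprehension (filterMap fed to Dict.ofList) over group_to_muts.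
def map_group_to_backbone_mutations_alt (mutation_group : List (String × Int)) (group_to_muts : List (Int × List String)) (backbone_mutations : List String) : List (String × List String) :=
  let mgd : PySem.Dict String Int := PySem.Dict.ofList mutation_group
  let first : PySem.Dict Int String :=
    backbone_mutations.reverse.foldl (fun d m =>
      match mgd.get? m with
      | some g => d.insert g m
      | none => d) PySem.Dict.empty
  (PySem.Dict.ofList ((PySem.Dict.ofList group_to_muts).items.filterMap
      (fun p => (first.get? p.1).map (fun k => (k, p.2))))).items

-- ===== PRECONDITION & SPEC =====
def Spec_map_group_to_backbone_mutations (mutation_group : List (String × Int)) (group_to_muts : List (Int × List String)) (backbone_mutations : List String) (out : List (String × List String)) : Prop := out = map_group_to_backbone_mutations_alt mutation_group group_to_muts backbone_mutations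
instance (mutation_group : List (String × Int)) (group_to_muts : List (Int × List String)) (backbone_mutations : List String) (out : List (String × List String)) : Decidable (Spec_map_group_to_backbone_mutations mutation_group group_to_muts backbone_mutations out) := by unfold Spec_map_group_to_backbone_mutations; infer_instance

-- ===== CLAIM (what is proved, stated in full; the proofs are below) =====
def Claim_equal_map_group_to_backbone_mutations : Prop := ∀ (mutation_group : List (String × Int)) (group_to_muts : List (Int × List String)) (backbone_mutations : List String), Dom_map_group_to_backbone_mutations mutation_group group_to_muts backbone_mutations → Spec_map_group_to_backbone_mutations mutation_group group_to_muts backbone_mutations (map_group_to_backbone_mutations mutation_group group_to_muts backbone_mutations)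

-- ===== LEMMAS AND PROOFS =====

-- Re-inserting the items of a dict (fresh, distinct keys) into an empty dict rebuilds the same dict.
lemma pv_rebuild_eq (mg : List (String × Int)) :
    ((PySem.Dict.ofList mg).items.foldl (fun d p => d.insert p.1 p.2)
      (PySem.Dict.empty : PySem.Dict String Int)) = PySem.Dict.ofList mg := by
  apply PySem.Dict.ext
  rw [PySem.Dict.items_foldl_insert_fresh (k := Prod.fst) (v := Prod.snd)
        (l := (PySem.Dict.ofList mg).items) (d := PySem.Dict.empty)
        (by intro a _; exact PySem.Dict.contains_empty _)
        (PySem.Dict.nodup_keys_ofList mg)]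
  simp [PySem.Dict.empty]

-- The lookup of B's reverse-overwrite pass, written as a foldr, is the head of A's
-- filtered list (falling back to whatever the start dict held).
lemma pv_first_get (mgd : PySem.Dict String Int) (back : List String)
    (d : PySem.Dict Int String) (g : Int) :
    (back.foldr (fun m d =>
        match mgd.get? m with
        | some h => d.insert h m
        | none => d) d).get? g
      = ((back.filter (fun m => mgd.get? m == some g)).head?).or (d.get? g) := by
  induction back with
  | nil => simp
  | cons m rest ih =>
    simp only [List.foldr_cons, List.filter_cons]
    cases hm : mgd.get? m with
    | none => simp [ih]
    | some h =>
      by_cases hg : h = g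
      · subst hg
        simp [PySem.Dict.get?_insert_self]
      · simp [beq_iff_eq, hg, PySem.Dict.get?_insert_of_ne _ _ (Ne.symm hg), ih]

-- A's result fold equals inserting B's filterMapped pairs, element by element.
lemma pv_fold_eq (mgd : PySem.Dict String Int) (back : List String)
    (first : PySem.Dict Int String)
    (hfg : ∀ g : Int, first.get? g = (back.filter (fun m => mgd.get? m == some g)).head?)
    (l : List (Int × List String)) (acc : PySem.Dict String (List String)) :
    l.foldl (fun acc p =>
        match back.filter (fun m => mgd.get? m == some p.1) with
        | [] => acc
        | k :: _ => acc.insert k p.2) acc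
      = (l.filterMap (fun p => (first.get? p.1).map (fun k => (k, p.2)))).foldl
          (fun d q => d.insert q.1 q.2) acc := by
  induction l generalizing acc with
  | nil => rfl
  | cons p rest ih =>
    simp only [List.foldl_cons, List.filterMap_cons, hfg p.1]
    cases hl : back.filter (fun m => mgd.get? m == some p.1) with
    | nil => simp only [List.head?_nil, Option.map_none]; exact ih acc
    | cons k t => simp only [List.head?_cons, Option.map_some, List.foldl_cons]; exact ih _

lemma pv_main (mutation_group : List (String × Int)) (group_to_muts : List (Int × List String))
    (backbone_mutations : List String) :
    map_group_to_backbone_mutations mutation_group group_to_muts backbone_mutations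
      = map_group_to_backbone_mutations_alt mutation_group group_to_muts backbone_mutations := by
  unfold map_group_to_backbone_mutations map_group_to_backbone_mutations_alt
  simp only [pv_rebuild_eq, List.foldl_reverse]
  rw [pv_fold_eq (PySem.Dict.ofList mutation_group) backbone_mutations _
        (fun g => by rw [pv_first_get, PySem.Dict.get?_empty, Option.or_none])]
  rfl

-- ===== VERDICT (by name: the statement is the Claim_ definition above) =====
theorem map_group_to_backbone_mutations_spec : Claim_equal_map_group_to_backbone_mutations := by
  intro mg gtm back _
  exact pv_main mg gtm back
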